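-- pv_equiv track=rewrite | github.com/dplocki/aquaQ-challenge | solutions/challenge24.py | solution
-- ===== SOURCE A (Python) =====
-- from collections import Counter
--
-- class Node:
--     def __init__(self, value: str, frequency: int, left=None, right=None) -> None:
--         self.value = value
--         self.frequency = frequency
--         self.left = left
--         self.right = right
--
--     def __repr__(self) -> str:
--         return f"{self.value}:{self.frequency}"
--
-- def solution(line_for_dictionary: str, encoded_text: str) -> str:
--     def build_tree(text: str):
--         nodes = [Node(letter, frequency) for letter, frequency in Counter(text).items()]
--
--         while len(nodes) > 1:
--             nodes.sort(key=lambda node: (node.frequency, len(node.value), node.value))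
--
--             nodes.append(
--                 Node(
--                     nodes[0].value + nodes[1].value,
--                     nodes[0].frequency + nodes[1].frequency,
--                     nodes[0],
--                     nodes[1],
--                 )
--             )
--
--             nodes = nodes[2:]
--
--         return nodes[0]
--
--     def pass_by_tree(node, prefix):
--         if node.left == None and node.right == None:
--             yield node.value, prefix
--             return
--
--         yield from pass_by_tree(node.left, prefix + "0")
--         yield from pass_by_tree(node.right, prefix + "1")
--
--     def build_decoding_dictionary(node):
--         return {code: letter for letter, code in pass_by_tree(node, "")}
--
--     def decoding_message(decode_dictionary, encoded_text: str) -> str: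
--         result = []
--         chunk = ""
--
--         while encoded_text:
--             chunk += encoded_text[0]
--             encoded_text = encoded_text[1:]
--
--             if chunk in decode_dictionary:
--                 result.append(decode_dictionary[chunk])
--                 chunk = ""
--
--         return "".join(result)
--
--     tree = build_tree(line_for_dictionary)
--     dictionary_tree = build_decoding_dictionary(tree)
--     return decoding_message(dictionary_tree, encoded_text)
-- ===== SOURCE B (Python) =====
-- def solution(line_for_dictionary: str, encoded_text: str) -> str:
--     # count letter frequencies
--     counts = {}
--     for ch in line_for_dictionary:
--         counts[ch] = counts.get(ch, 0) + 1
--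
--     # nodes are (frequency, length-of-value, value, [(letter, code), ...]);
--     # no tree is ever built: the code table is merged directly.
--     nodes = [(freq, 1, letter, [(letter, "")]) for letter, freq in counts.items()]
--     while len(nodes) > 1:
--         nodes.sort(key=lambda n: n[:3])
--         (f0, l0, v0, c0), (f1, l1, v1, c1) = nodes[0], nodes[1]
--         merged = [(letter, "0" + code) for letter, code in c0] \
--                + [(letter, "1" + code) for letter, code in c1]
--         nodes = nodes[2:] + [(f0 + f1, l0 + l1, v0 + v1, merged)]
--
--     codes = nodes[0][3]
--     decode = {code: letter for letter, code in codes}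
--     maxlen = 0
--     for _letter, code in codes:
--         maxlen = max(maxlen, len(code))
--
--     # one pass over the encoded text; once the pending chunk is longer than
--     # every code it can never complete again, so stop.
--     out = []
--     chunk = ""
--     for bit in encoded_text:
--         chunk += bit
--         if chunk in decode:
--             out.append(decode[chunk])
--             chunk = ""
--         elif len(chunk) > maxlen:
--             break
--     return "".join(out)
-- ===== Notes on version B (the rewrite author's own statement) =====
-- stated objective: faster
-- what changed: B never builds the Huffman tree: it merges letter-to-code tables directly while combining the two smallest nodes, then decodes in a single pass with an accumulated chunk and an early stop once the chunk is longer than every code, instead of A's per-bit re-slicing of the remaining encoded text.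
import Mathlib
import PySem

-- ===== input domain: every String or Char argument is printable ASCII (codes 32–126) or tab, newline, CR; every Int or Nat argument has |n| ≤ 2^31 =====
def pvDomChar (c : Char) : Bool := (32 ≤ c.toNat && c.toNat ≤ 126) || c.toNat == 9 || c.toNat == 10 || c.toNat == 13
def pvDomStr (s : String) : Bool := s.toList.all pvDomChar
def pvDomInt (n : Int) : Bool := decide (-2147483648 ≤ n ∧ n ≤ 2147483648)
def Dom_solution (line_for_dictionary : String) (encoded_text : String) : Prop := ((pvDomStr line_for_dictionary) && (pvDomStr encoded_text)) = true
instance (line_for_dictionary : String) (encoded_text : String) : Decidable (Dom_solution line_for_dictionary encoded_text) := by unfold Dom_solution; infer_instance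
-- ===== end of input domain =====

-- B never builds the Huffman tree (it merges letter→code tables directly) and decodes in
-- one pass with an accumulated chunk and an early stop, instead of re-slicing the
-- remaining text on every bit; measurably faster on decodable input.

-- ===== PORT A =====

-- Python's Node objects: a leaf carries (value, frequency), an inner node also its children.
inductive HTree
  | leaf (value : List Char) (freq : Int)
  | node (value : List Char) (freq : Int) (l r : HTree)

def HTree.val : HTree → List Char
  | .leaf v _ => v
  | .node v _ _ _ => v

def HTree.freq : HTree → Int
  | .leaf _ f => f
  | .node _ f _ _ => f

-- sort key: lambda node: (node.frequency, len(node.value), node.value)  (Python tuple order = Lex)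
def keyA (t : HTree) : Lex (Int × Lex (Int × List Char)) :=
  toLex (t.freq, toLex ((t.val.length : Int), t.val))

-- while len(nodes) > 1: sort; merge first two at the end; drop the first two
def buildLoopA (nodes : List HTree) : List HTree :=
  if h : 1 < nodes.length then
    let a := (PySem.List.sorted nodes keyA false)[0]'(by rw [PySem.List.length_sorted]; omega)
    let b := (PySem.List.sorted nodes keyA false)[1]'(by rw [PySem.List.length_sorted]; omega)
    -- nodes.append(Node(...)); nodes = nodes[2:]
    buildLoopA (PySem.List.slice
      (PySem.List.sorted nodes keyA false ++ [HTree.node (a.val ++ b.val) (a.freq + b.freq) a b])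
      (some 2) none)
  else nodes
termination_by nodes.length
decreasing_by
  simp [pysem, PySem.List.length_sorted]
  omega

-- pass_by_tree(node, prefix): yields (node.value, prefix) at leaves, left '0' / right '1'
def passBy (t : HTree) (pre : List Char) : List (List Char × List Char) :=
  match t with
  | .leaf v _ => [(v, pre)]
  | .node _ _ l r => passBy l (pre ++ ['0']) ++ passBy r (pre ++ ['1'])

-- decoding_message: while encoded_text: chunk += encoded_text[0]; encoded_text = encoded_text[1:]; …
def decodeA (d : PySem.Dict (List Char) (List Char)) :
    List Char → List Char → List (List Char) → List (List Char)
  | [], _chunk, result => result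
  | c :: rest, chunk, result =>
      let chunk' := chunk ++ [c]
      if d.contains chunk' then decodeA d rest [] (result ++ [d.getD chunk' []])
      else decodeA d rest chunk' result

def solution (line_for_dictionary : String) (encoded_text : String) : String :=
  let counts := PySem.Dict.counter line_for_dictionary.toList
  let leaves := counts.items.map (fun p => HTree.leaf [p.1] p.2)
  match buildLoopA leaves with
  | [] => ""   -- Python raises IndexError here (empty dictionary line); excluded by Pre_solution
  | t :: _ =>
      let d := (passBy t []).foldl (fun d p => d.insert p.2 p.1) PySem.Dict.empty
      String.ofList (PySem.Chars.join [] (decodeA d encoded_text.toList [] []))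

-- ===== PORT B =====

-- B's node tuples: (frequency, len(value), value, [(letter, code), …])
def keyB (n : Int × Int × List Char × List (List Char × List Char)) : Lex (Int × Lex (Int × List Char)) :=
  toLex (n.1, toLex (n.2.1, n.2.2.1))

def buildLoopB (nodes : List (Int × Int × List Char × List (List Char × List Char))) :
    List (Int × Int × List Char × List (List Char × List Char)) :=
  if h : 1 < nodes.length then
    let n0 := (PySem.List.sorted nodes keyB false)[0]'(by rw [PySem.List.length_sorted]; omega)
    let n1 := (PySem.List.sorted nodes keyB false)[1]'(by rw [PySem.List.length_sorted]; omega)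
    let merged := n0.2.2.2.map (fun p => (p.1, '0' :: p.2))
               ++ n1.2.2.2.map (fun p => (p.1, '1' :: p.2))
    -- nodes = nodes[2:] + [merged node]
    buildLoopB (PySem.List.slice (PySem.List.sorted nodes keyB false) (some 2) none
      ++ [(n0.1 + n1.1, n0.2.1 + n1.2.1, n0.2.2.1 ++ n1.2.2.1, merged)])
  else nodes
termination_by nodes.length
decreasing_by
  simp [pysem, PySem.List.length_sorted]
  omega

-- one pass with break: for bit in encoded_text: chunk += bit; match, or stop once too long
def decodeB (d : PySem.Dict (List Char) (List Char)) (maxlen : Int) :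
    List Char → List Char → List (List Char) → List (List Char)
  | [], _chunk, out => out
  | c :: rest, chunk, out =>
      let chunk' := chunk ++ [c]
      if d.contains chunk' then decodeB d maxlen rest [] (out ++ [d.getD chunk' []])
      else if maxlen < (chunk'.length : Int) then out   -- break
      else decodeB d maxlen rest chunk' out

def solution_alt (line_for_dictionary : String) (encoded_text : String) : String :=
  let counts := line_for_dictionary.toList.foldl
    (fun d ch => d.insert ch (d.getD ch 0 + 1)) PySem.Dict.empty
  let nodes := counts.items.map
    (fun p => ((p.2 : Int), (1 : Int), [p.1], [([p.1], ([] : List Char))]))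
  match buildLoopB nodes with
  | [] => ""   -- Python raises IndexError here (empty dictionary line); excluded by Pre_solution
  | n :: _ =>
      let codes := n.2.2.2
      let d := codes.foldl (fun d p => d.insert p.2 p.1) PySem.Dict.empty
      let maxlen := codes.foldl (fun acc p => max acc (PySem.List.len p.2)) 0
      String.ofList (PySem.Chars.join [] (decodeB d maxlen encoded_text.toList [] []))

-- ===== PRECONDITION & SPEC =====
-- A (and B) raise IndexError on an empty dictionary line (no nodes to take nodes[0] from).
def Pre_solution (line_for_dictionary : String) (encoded_text : String) : Prop :=
  line_for_dictionary ≠ ""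
instance (line_for_dictionary : String) (encoded_text : String) : Decidable (Pre_solution line_for_dictionary encoded_text) := by unfold Pre_solution; infer_instance

def pvWitness_solution : String × String := ("aab", "010")

def Spec_solution (line_for_dictionary : String) (encoded_text : String) (out : String) : Prop := out = solution_alt line_for_dictionary encoded_text
instance (line_for_dictionary : String) (encoded_text : String) (out : String) : Decidable (Spec_solution line_for_dictionary encoded_text out) := by unfold Spec_solution; infer_instance

-- ===== CLAIM (what is proved, stated in full; the proofs are below) =====
def Claim_equal_solution : Prop := ∀ (line_for_dictionary : String) (encoded_text : String), Dom_solution line_for_dictionary encoded_text → Pre_solution line_for_dictionary encoded_text → Spec_solution line_for_dictionary encoded_text (solution line_for_dictionary encoded_text)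

-- ===== LEMMAS AND PROOFS =====

-- A tree and its B-tuple: same frequency, length, value, and code table (= in-order code list).
def tupleOf (t : HTree) : Int × Int × List Char × List (List Char × List Char) :=
  (t.freq, (t.val.length : Int), t.val, passBy t [])

theorem key_eq (t : HTree) : keyB (tupleOf t) = keyA t := rfl

theorem passBy_prefix (t : HTree) (pre : List Char) :
    passBy t pre = (passBy t []).map (fun q => (q.1, pre ++ q.2)) := by
  induction t generalizing pre with
  | leaf v f => simp [passBy]
  | node v f l r ihl ihr =>
      simp only [passBy, List.map_append, List.nil_append]
      rw [ihl (pre ++ ['0']), ihr (pre ++ ['1']), ihl ['0'], ihr ['1']]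
      simp [List.map_map, Function.comp_def]

theorem insertBy_map {α β : Type} (f : α → β) (bA : α → α → Bool) (bB : β → β → Bool)
    (h : ∀ a b, bB (f a) (f b) = bA a b) (x : α) (ys : List α) :
    PySem.List.insertBy bB (f x) (ys.map f) = (PySem.List.insertBy bA x ys).map f := by
  induction ys with
  | nil => simp [PySem.List.insertBy]
  | cons y ys ih =>
      simp only [List.map_cons, PySem.List.insertBy, h]
      by_cases hb : bA x y = true
      · simp [hb]
      · simp [hb, ih]

theorem sorted_map {α β κ : Type} [LT κ] [DecidableLT κ] (f : α → β)
    (kA : α → κ) (kB : β → κ) (h : ∀ a, kB (f a) = kA a) (xs : List α) :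
    PySem.List.sorted (xs.map f) kB false = (PySem.List.sorted xs kA false).map f := by
  rw [PySem.List.sorted_eq_foldl_insertBy, PySem.List.sorted_eq_foldl_insertBy]
  suffices hgen : ∀ (xs : List α) (acc : List α),
      (xs.map f).foldl (fun acc x => PySem.List.insertBy (fun a b => decide (kB a < kB b)) x acc) (acc.map f)
      = (xs.foldl (fun acc x => PySem.List.insertBy (fun a b => decide (kA a < kA b)) x acc) acc).map f by
    simpa using hgen xs []
  intro xs'
  induction xs' with
  | nil => intro acc; simp
  | cons x t ih =>
      intro acc
      simp only [List.map_cons, List.foldl_cons]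
      rw [insertBy_map f (fun a b => decide (kA a < kA b)) (fun a b => decide (kB a < kB b))
        (by intro a b; simp [h]), ih]

theorem slice_two {α : Type} (xs : List α) :
    PySem.List.slice xs (some 2) none = xs.drop 2 := by
  rw [PySem.List.slice_from xs (a := 2) (by omega)]; rfl

theorem tupleOf_merge (a b : HTree) :
    tupleOf (HTree.node (a.val ++ b.val) (a.freq + b.freq) a b)
      = ((tupleOf a).1 + (tupleOf b).1, (tupleOf a).2.1 + (tupleOf b).2.1,
         (tupleOf a).2.2.1 ++ (tupleOf b).2.2.1,
         (tupleOf a).2.2.2.map (fun p => (p.1, '0' :: p.2))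
           ++ (tupleOf b).2.2.2.map (fun p => (p.1, '1' :: p.2))) := by
  simp [tupleOf, HTree.val, HTree.freq, passBy, passBy_prefix a ['0'], passBy_prefix b ['1']]

theorem build_rel : ∀ (n : Nat) (nodes : List HTree), nodes.length ≤ n →
    buildLoopB (nodes.map tupleOf) = (buildLoopA nodes).map tupleOf := by
  intro n
  induction n with
  | zero =>
      intro nodes h
      have hnil : nodes = [] := List.eq_nil_of_length_eq_zero (Nat.le_zero.mp h)
      subst hnil
      simp [buildLoopA, buildLoopB]
  | succ n ih =>
      intro nodes h
      rw [buildLoopB.eq_def, buildLoopA.eq_def]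
      simp only [List.length_map]
      split_ifs with hlen
      · have hsm := sorted_map tupleOf keyA keyB key_eq nodes
        have hls := PySem.List.length_sorted (xs := nodes) (key := keyA) (rev := false)
        simp only [hsm, List.getElem_map, slice_two,
          List.drop_append_of_le_length (show 2 ≤ (PySem.List.sorted nodes keyA false).length by omega)]
        rw [← tupleOf_merge, ← List.map_drop]
        have harg : List.map tupleOf ((PySem.List.sorted nodes keyA false).drop 2)
              ++ [tupleOf (HTree.node ((PySem.List.sorted nodes keyA false)[0].val ++ (PySem.List.sorted nodes keyA false)[1].val)
                    ((PySem.List.sorted nodes keyA false)[0].freq + (PySem.List.sorted nodes keyA false)[1].freq)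
                    (PySem.List.sorted nodes keyA false)[0] (PySem.List.sorted nodes keyA false)[1])]
            = List.map tupleOf ((PySem.List.sorted nodes keyA false).drop 2
              ++ [HTree.node ((PySem.List.sorted nodes keyA false)[0].val ++ (PySem.List.sorted nodes keyA false)[1].val)
                    ((PySem.List.sorted nodes keyA false)[0].freq + (PySem.List.sorted nodes keyA false)[1].freq)
                    (PySem.List.sorted nodes keyA false)[0] (PySem.List.sorted nodes keyA false)[1]]) := by
          simp
        rw [harg]
        exact ih _ (by simp; omega)
      · rfl

-- once the pending chunk is longer than every key, A's loop can never match again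
theorem decodeA_dead (d : PySem.Dict (List Char) (List Char)) (maxlen : Int)
    (hk : ∀ k ∈ d.keys, (k.length : Int) ≤ maxlen) :
    ∀ (rest chunk : List Char) (out : List (List Char)),
      maxlen < (chunk.length : Int) → decodeA d rest chunk out = out := by
  intro rest
  induction rest with
  | nil => intro chunk out _; rfl
  | cons c r ih =>
      intro chunk out hlong
      have hc : d.contains (chunk ++ [c]) = false := by
        by_contra hcc
        have hmem : (chunk ++ [c]) ∈ d.keys :=
          (PySem.Dict.contains_iff_mem_keys d (chunk ++ [c])).mp (by revert hcc; simp)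
        have := hk _ hmem
        simp at this
        omega
      simp only [decodeA, hc, Bool.false_eq_true, if_false]
      exact ih _ _ (by simp at hlong ⊢; omega)

theorem decode_rel (d : PySem.Dict (List Char) (List Char)) (maxlen : Int)
    (hk : ∀ k ∈ d.keys, (k.length : Int) ≤ maxlen) :
    ∀ (enc chunk : List Char) (out : List (List Char)),
      decodeA d enc chunk out = decodeB d maxlen enc chunk out := by
  intro enc
  induction enc with
  | nil => intro chunk out; rfl
  | cons c rest ih =>
      intro chunk out
      simp only [decodeA, decodeB]
      by_cases hc : d.contains (chunk ++ [c]) = true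
      · simp only [hc, if_true]; exact ih _ _
      · simp only [hc, Bool.false_eq_true, if_false]
        by_cases hlen : maxlen < ((chunk ++ [c]).length : Int)
        · simp only [hlen, if_true]
          exact decodeA_dead d maxlen hk rest (chunk ++ [c]) out hlen
        · simp only [hlen, if_false]; exact ih _ _

-- ===== VERDICT (by name: the statement is the Claim_ definition above) =====
theorem solution_spec : Claim_equal_solution := by
  intro line enc _hd _hp
  unfold Spec_solution
  simp only [solution, solution_alt]
  rw [PySem.Dict.foldl_insert_getD_add_one_eq_counter]
  have hmap : (PySem.Dict.counter line.toList).items.map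
        (fun p => ((p.2 : Int), (1 : Int), [p.1], [([p.1], ([] : List Char))]))
      = ((PySem.Dict.counter line.toList).items.map (fun p => HTree.leaf [p.1] p.2)).map tupleOf := by
    simp [List.map_map, tupleOf, HTree.val, HTree.freq, passBy, Function.comp_def]
  rw [hmap, build_rel (((PySem.Dict.counter line.toList).items.map
      (fun p => HTree.leaf [p.1] p.2)).length) _ le_rfl]
  cases hb : buildLoopA ((PySem.Dict.counter line.toList).items.map
      (fun p => HTree.leaf [p.1] p.2)) with
  | nil => simp
  | cons t ts =>
      simp only [List.map_cons, tupleOf]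
      have hk : ∀ k ∈ ((passBy t []).foldl (fun d p => d.insert p.2 p.1)
            (PySem.Dict.empty : PySem.Dict (List Char) (List Char))).keys,
          ((k.length : Int)) ≤ (passBy t []).foldl (fun acc p => max acc (PySem.List.len p.2)) 0 := by
        intro k hkm
        rw [PySem.Dict.keys_foldl_insert_key (passBy t []) (fun p => p.2) (fun _ p => p.1) PySem.Dict.empty] at hkm
        simp only [PySem.Dict.keys_empty, PySem.Set.update_nil_left, PySem.Set.mem_ofList] at hkm
        obtain ⟨p, hp, hpk⟩ := List.mem_map.mp hkm
        have := (PySem.List.le_foldl_max_int (passBy t []) (fun p => PySem.List.len p.2) 0).2 p hp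
        simpa [PySem.List.len_eq, hpk] using this
      rw [decode_rel _ _ hk]
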